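-- pv_equiv track=rewrite | github.com/BaeJin/DAlmaden | engine/crawler/crawlLibnavershopping.py | get_product_character_value
-- ===== SOURCE A (Python) =====
-- def get_product_character_value(product_info):
--     ##attributeValue 를 가져오는 작업
--     characterValue_data = {}
--     keys = product_info['attributeValue'].split("|")
--     values = product_info['characterValue'].split("|")
--     for idx2, key in enumerate(keys):
--         if key not in characterValue_data.keys():
--             characterValue_data[key] = values[idx2]
--         else:
--             characterValue_data[key] += ',' + values[idx2]
--     for key in characterValue_data.keys():
--         characterValue_data[key] = characterValue_data[key].split(",")
--     return characterValue_data
-- ===== SOURCE B (Python) =====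
-- def get_product_character_value(product_info):
--     # single pass: split each value as it arrives and extend a list accumulator
--     grouped = {}
--     keys = product_info['attributeValue'].split("|")
--     values = product_info['characterValue'].split("|")
--     for idx, key in enumerate(keys):
--         grouped.setdefault(key, []).extend(values[idx].split(","))
--     return grouped
-- ===== Notes on version B (the rewrite author's own statement) =====
-- stated objective: simpler
-- what changed: B builds the grouped dict in one pass with setdefault(key, []).extend(value.split(',')), splitting each value as it arrives, instead of A's string-concatenation accumulator followed by a second pass that re-splits every concatenated string.
-- outside the precondition, e.g. on get_product_character_value({}): A raises KeyError, B raises KeyError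
import Mathlib
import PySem

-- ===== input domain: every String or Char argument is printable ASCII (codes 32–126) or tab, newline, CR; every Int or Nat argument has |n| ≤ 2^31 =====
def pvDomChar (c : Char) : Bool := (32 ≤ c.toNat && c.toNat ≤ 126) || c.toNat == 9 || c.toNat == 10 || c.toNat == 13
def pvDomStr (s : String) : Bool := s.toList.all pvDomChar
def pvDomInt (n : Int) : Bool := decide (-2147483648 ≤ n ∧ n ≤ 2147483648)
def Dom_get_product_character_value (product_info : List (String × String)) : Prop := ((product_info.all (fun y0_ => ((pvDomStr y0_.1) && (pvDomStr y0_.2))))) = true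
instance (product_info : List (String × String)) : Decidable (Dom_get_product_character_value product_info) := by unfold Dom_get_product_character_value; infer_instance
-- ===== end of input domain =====

-- B groups in one pass, extending list accumulators with each value split on arrival,
-- instead of A's string-concatenation accumulator plus a second re-splitting pass (objective: simpler).


-- ===== PORT A =====
-- exact on code points: strings are handled as List Char via PySem.Chars
def get_product_character_value (product_info : List (String × String)) : List (String × List String) :=
  let d0 := PySem.Dict.ofList product_info
  let keys := PySem.Chars.splitOn (d0.getD "attributeValue" "").toList ['|']
  let values := PySem.Chars.splitOn (d0.getD "characterValue" "").toList ['|']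
  let cd := (PySem.List.enumerate keys 0).foldl
      (fun (cd : PySem.Dict (List Char) (List Char)) p =>
        if cd.contains p.2 = false then cd.insert p.2 (PySem.List.pyGetD values p.1 [])
        else cd.modify p.2 [] (fun s => s ++ [','] ++ PySem.List.pyGetD values p.1 []))
      PySem.Dict.empty
  cd.items.map (fun p => (String.ofList p.1, (PySem.Chars.splitOn p.2 [',']).map String.ofList))

-- ===== PORT B =====
def get_product_character_value_alt (product_info : List (String × String)) : List (String × List String) :=
  let d0 := PySem.Dict.ofList product_info
  let values := PySem.Chars.splitOn (d0.getD "characterValue" "").toList ['|']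
  let g := (PySem.List.enumerate (PySem.Chars.splitOn (d0.getD "attributeValue" "").toList ['|']) 0).foldl
      (fun (g : PySem.Dict (List Char) (List (List Char))) p =>
        g.modify p.2 [] (fun l => l ++ PySem.Chars.splitOn (PySem.List.pyGetD values p.1 []) [',']))
      PySem.Dict.empty
  g.items.map (fun p => (String.ofList p.1, p.2.map String.ofList))

-- ===== PRECONDITION & SPEC =====
-- Pre_ excludes exactly the inputs where Python A raises: a missing 'attributeValue' or
-- 'characterValue' key (KeyError), or fewer '|'-separated values than keys (IndexError).
def Pre_get_product_character_value (product_info : List (String × String)) : Prop :=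
  (PySem.Dict.ofList product_info).contains "attributeValue" = true ∧
  (PySem.Dict.ofList product_info).contains "characterValue" = true ∧
  (PySem.Chars.splitOn ((PySem.Dict.ofList product_info).getD "attributeValue" "").toList ['|']).length ≤
    (PySem.Chars.splitOn ((PySem.Dict.ofList product_info).getD "characterValue" "").toList ['|']).length
instance (product_info : List (String × String)) : Decidable (Pre_get_product_character_value product_info) := by
  unfold Pre_get_product_character_value; infer_instance
def pvWitness_get_product_character_value : (List (String × String)) :=
  [("attributeValue", "color|size|color"), ("characterValue", "red,blue|XL|green")]
def Spec_get_product_character_value (product_info : List (String × String)) (out : List (String × List String)) : Prop := out = get_product_character_value_alt product_info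
instance (product_info : List (String × String)) (out : List (String × List String)) : Decidable (Spec_get_product_character_value product_info out) := by unfold Spec_get_product_character_value; infer_instance

-- ===== CLAIM (what is proved, stated in full; the proofs are below) =====
def Claim_equal_get_product_character_value : Prop := ∀ (product_info : List (String × String)), Dom_get_product_character_value product_info → Pre_get_product_character_value product_info → Spec_get_product_character_value product_info (get_product_character_value product_info)

-- ===== LEMMAS AND PROOFS =====

theorem pv_splitOn_go_char (c : Char) (fuel : Nat) :
    ∀ (l cur : List Char) (accs : List (List Char)), l.length ≤ fuel →
      PySem.Chars.splitOn.go [c] fuel l cur accs =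
        accs.reverse ++ List.modifyHead (cur.reverse ++ ·) (List.splitOnP (· == c) l) := by
  induction fuel with
  | zero =>
    intro l cur accs hl
    have h0 : l = [] := List.length_eq_zero_iff.mp (Nat.le_zero.mp hl)
    subst h0
    simp [PySem.Chars.splitOn.go, List.splitOnP_nil, List.modifyHead]
  | succ fuel ih =>
    intro l cur accs hl
    cases l with
    | nil => simp [PySem.Chars.splitOn.go, List.splitOnP_nil, List.modifyHead]
    | cons c' rest =>
      rw [PySem.Chars.splitOn.go]
      by_cases hc : c' = c
      · subst hc
        have hpre : [c'].isPrefixOf (c' :: rest) = true := by simp [List.isPrefixOf]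
        rw [if_pos hpre]
        simp only [List.length_cons, List.drop_succ_cons, List.length_nil, List.drop_zero]
        rw [ih rest [] (cur.reverse :: accs) (by simpa using Nat.le_of_succ_le_succ hl)]
        simp [List.splitOnP_cons, List.modifyHead]
        cases hsp : List.splitOnP (fun x => x == c') rest with
        | nil => exact absurd hsp (List.splitOnP_ne_nil _ _)
        | cons a t => rfl
      · have hpre : [c].isPrefixOf (c' :: rest) = false := by
          simp [List.isPrefixOf]
          intro h; exact absurd h.symm hc
        rw [if_neg (by simp [hpre])]
        rw [ih rest (c' :: cur) accs (by simpa using Nat.le_of_succ_le_succ hl)]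
        simp [List.splitOnP_cons, hc, List.modifyHead_modifyHead, Function.comp_def]

theorem pv_splitOn_char (c : Char) (s : List Char) :
    PySem.Chars.splitOn s [c] = List.splitOnP (· == c) s := by
  rw [PySem.Chars.splitOn, pv_splitOn_go_char c (s.length+1) s [] [] (by omega)]
  cases h : List.splitOnP (· == c) s with
  | nil => exact absurd h (List.splitOnP_ne_nil _ _)
  | cons a t => simp

theorem pv_contains_congr (dA : PySem.Dict (List Char) (List Char))
    (dB : PySem.Dict (List Char) (List (List Char))) (f : List Char → List (List Char))
    (h : dB.items = dA.items.map (fun q => (q.1, f q.2))) (k : List Char) :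
    dB.contains k = dA.contains k := by
  simp [PySem.Dict.contains, h, List.any_map, Function.comp_def]
theorem pv_get?_congr (dA : PySem.Dict (List Char) (List Char))
    (dB : PySem.Dict (List Char) (List (List Char))) (f : List Char → List (List Char))
    (h : dB.items = dA.items.map (fun q => (q.1, f q.2))) (k : List Char) :
    dB.get? k = Option.map f (dA.get? k) := by
  simp only [PySem.Dict.get?, h, List.find?_map, Function.comp_def, Option.map_map]
theorem pv_split_comma_append (a b : List Char) :
    List.splitOnP (· == ',') (a ++ ',' :: b) =
      List.splitOnP (· == ',') a ++ List.splitOnP (· == ',') b :=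
  List.splitOnP_append_cons _ a b ',' (by decide)

theorem pv_inv (values : List (List Char)) (ks : List (Int × List Char)) :
    ∀ (dA : PySem.Dict (List Char) (List Char)) (dB : PySem.Dict (List Char) (List (List Char))),
      dB.items = dA.items.map (fun q => (q.1, List.splitOnP (· == ',') q.2)) →
      (ks.foldl (fun g p => g.modify p.2 []
          (fun l => l ++ PySem.Chars.splitOn (PySem.List.pyGetD values p.1 []) [','])) dB).items =
      (ks.foldl (fun cd p =>
          if cd.contains p.2 = false then cd.insert p.2 (PySem.List.pyGetD values p.1 [])
          else cd.modify p.2 [] (fun s => s ++ [','] ++ PySem.List.pyGetD values p.1 [])) dA).items.map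
        (fun q => (q.1, List.splitOnP (· == ',') q.2)) := by
  induction ks with
  | nil => intro dA dB h; simpa using h
  | cons p t ih =>
    intro dA dB h
    simp only [List.foldl_cons]
    set v := PySem.List.pyGetD values p.1 [] with hv
    have hcont := pv_contains_congr dA dB _ h p.2
    have hget := pv_get?_congr dA dB _ h p.2
    by_cases hc : dA.contains p.2 = true
    · have hcB : dB.contains p.2 = true := by rw [hcont]; exact hc
      obtain ⟨old, hold⟩ : ∃ old, dA.get? p.2 = some old := by
        cases ho : dA.get? p.2 with
        | some o => exact ⟨o, rfl⟩
        | none =>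
          exfalso
          have := PySem.Dict.get?_eq_none_iff_contains (d := dA) (k := p.2)
          rw [ho] at this
          simp [hc] at this
      rw [if_neg (by simp [hc])]
      apply ih
      simp only [PySem.Dict.modify, PySem.Dict.getD, hold, hget, Option.map_some, Option.getD_some]
      simp only [PySem.Dict.insert, hc, hcB, if_pos]
      rw [h, List.map_map, List.map_map]
      apply List.map_congr_left
      intro q _
      by_cases hq : q.1 = p.2 <;>
        simp [hq, pv_split_comma_append, pv_splitOn_char]
    · have hcB : dB.contains p.2 = false := by rw [hcont]; simpa using hc
      have hgA : dA.get? p.2 = none := by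
        have := PySem.Dict.get?_eq_none_iff_contains (d := dA) (k := p.2)
        simp [hc] at this; simpa using this
      rw [if_pos (by simpa using hc)]
      apply ih
      simp only [PySem.Dict.modify, PySem.Dict.getD, hget, hgA, Option.map_none, Option.getD_none]
      simp [PySem.Dict.insert, hcB, hc, h, pv_splitOn_char]

-- ===== VERDICT (by name: the statement is the Claim_ definition above) =====
theorem get_product_character_value_spec : Claim_equal_get_product_character_value := by
  intro product_info _ _
  unfold Spec_get_product_character_value
  simp only [get_product_character_value, get_product_character_value_alt]
  rw [pv_inv _ _ PySem.Dict.empty PySem.Dict.empty rfl, List.map_map]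
  apply List.map_congr_left
  intro q _
  simp [pv_splitOn_char]
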